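-- pv_equiv track=rewrite | github.com/abdiesu04/Codeforces | A2SV Contests/Contest #10/C_Kuroni_and_Simple_Strings.py | check_parentheses_order
-- ===== SOURCE A (Python) =====
-- def check_parentheses_order(string):
--     stack = []
--     f = 0
--
--     for char in string:
--         if char == '(' and f == 0:
--             return False
--         elif char == ')':
--             f += 1
--
--     return True
-- ===== SOURCE B (Python) =====
-- def check_parentheses_order(string):
--     i = string.find('(')
--     j = string.find(')')
--     return not (i != -1 and (j == -1 or i < j))
-- ===== Notes on version B (the rewrite author's own statement) =====
-- stated objective: simpler
-- what changed: Replaced A's stateful early-exit scan with a flag counting close-parens seen by a closed-form comparison of the positions of the first open paren and first close paren obtained from str.find.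
import Mathlib
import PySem

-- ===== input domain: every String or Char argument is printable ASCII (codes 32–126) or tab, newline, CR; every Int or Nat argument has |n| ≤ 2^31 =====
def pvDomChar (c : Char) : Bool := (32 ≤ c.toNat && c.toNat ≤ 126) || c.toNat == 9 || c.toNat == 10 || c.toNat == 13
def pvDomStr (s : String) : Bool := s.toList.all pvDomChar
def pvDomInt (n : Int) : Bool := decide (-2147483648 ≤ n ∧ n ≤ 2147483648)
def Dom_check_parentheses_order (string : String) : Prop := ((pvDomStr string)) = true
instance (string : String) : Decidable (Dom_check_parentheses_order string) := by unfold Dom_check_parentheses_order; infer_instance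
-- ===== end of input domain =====

-- B replaces A's stateful early-exit scan with a closed-form comparison of str.find positions (objective: simpler).

-- ===== PORT A =====
-- A's for-loop with early return and the flag f counting ')' seen so far.
def pvALoop : List Char → Int → Bool
  | [], _ => true
  | c :: rest, f =>
    if c == '(' && f == 0 then false
    else if c == ')' then pvALoop rest (f + 1)
    else pvALoop rest f

def check_parentheses_order (string : String) : Bool :=
  pvALoop string.toList 0

-- ===== PORT B =====
def check_parentheses_order_alt (string : String) : Bool :=
  let i := PySem.Str.find string "("
  let j := PySem.Str.find string ")"
  !(i != -1 && (j == -1 || i < j))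

-- ===== PRECONDITION & SPEC =====
def Spec_check_parentheses_order (string : String) (out : Bool) : Prop := out = check_parentheses_order_alt string
instance (string : String) (out : Bool) : Decidable (Spec_check_parentheses_order string out) := by unfold Spec_check_parentheses_order; infer_instance

-- ===== CLAIM (what is proved, stated in full; the proofs are below) =====
def Claim_equal_check_parentheses_order : Prop := ∀ (string : String), Dom_check_parentheses_order string → Spec_check_parentheses_order string (check_parentheses_order string)

-- ===== LEMMAS AND PROOFS =====

theorem singleton_prefix_iff {α : Type} (c : α) (l : List α) : [c] <+: l ↔ l.head? = some c := by
  cases l with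
  | nil => simp
  | cons x xs => simp [List.cons_prefix_cons, eq_comm]

theorem singleton_infix_iff {α : Type} (c : α) (l : List α) : [c] <:+: l ↔ c ∈ l := by
  constructor
  · intro h
    exact (List.singleton_sublist).1 h.sublist
  · intro h
    obtain ⟨pre, suf, rfl⟩ := List.append_of_mem h
    exact ⟨pre, suf, by simp⟩

theorem find_singleton_cons (x : Char) (xs : List Char) (c : Char) :
    PySem.Chars.find (x :: xs) [c] =
      if x = c then 0
      else if PySem.Chars.find xs [c] = -1 then -1
      else PySem.Chars.find xs [c] + 1 := by
  by_cases hx : x = c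
  · subst hx
    rw [if_pos rfl]
    have hin : [x] <:+: (x :: xs) := (singleton_infix_iff x _).2 (by simp)
    have hnn : 0 ≤ PySem.Chars.find (x :: xs) [x] :=
      (PySem.Chars.find_nonneg_iff (x :: xs) [x]).2 hin
    obtain ⟨_, hmin⟩ := PySem.Chars.find_spec (s := x :: xs) (sub := [x]) hnn
    have h0 : ¬ (0 < (PySem.Chars.find (x :: xs) [x]).toNat) := by
      intro hpos
      exact hmin 0 hpos ((singleton_prefix_iff x _).2 (by simp))
    omega
  · rw [if_neg hx]
    have hmem : ([c] <:+: (x :: xs)) ↔ c ∈ xs := by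
      rw [singleton_infix_iff, List.mem_cons]
      constructor
      · rintro (h | h)
        · exact absurd h.symm hx
        · exact h
      · exact Or.inr
    by_cases hfx : PySem.Chars.find xs [c] = -1
    · rw [if_pos hfx]
      have hni : ¬ [c] <:+: xs := (PySem.Chars.find_eq_neg_one_iff xs [c]).1 hfx
      have hnm : c ∉ xs := fun h => hni ((singleton_infix_iff c xs).2 h)
      exact (PySem.Chars.find_eq_neg_one_iff _ _).2 (fun h => hnm (hmem.1 h))
    · rw [if_neg hfx]
      have hin' : [c] <:+: xs := (PySem.Chars.find_ne_neg_one_iff xs [c]).1 hfx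
      have hnn' : 0 ≤ PySem.Chars.find xs [c] :=
        (PySem.Chars.find_nonneg_iff xs [c]).2 hin'
      obtain ⟨hpre', hmin'⟩ := PySem.Chars.find_spec (s := xs) (sub := [c]) hnn'
      have hinc : [c] <:+: (x :: xs) := hmem.2 ((singleton_infix_iff c xs).1 hin')
      have hnn : 0 ≤ PySem.Chars.find (x :: xs) [c] :=
        (PySem.Chars.find_nonneg_iff _ _).2 hinc
      obtain ⟨hpre, hmin⟩ := PySem.Chars.find_spec (s := x :: xs) (sub := [c]) hnn
      have key : (PySem.Chars.find (x :: xs) [c]).toNat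
          = (PySem.Chars.find xs [c]).toNat + 1 := by
        rcases Nat.lt_trichotomy (PySem.Chars.find (x :: xs) [c]).toNat
            ((PySem.Chars.find xs [c]).toNat + 1) with h | h | h
        · exfalso
          rcases Nat.eq_zero_or_pos (PySem.Chars.find (x :: xs) [c]).toNat with h0 | hpos
          · rw [h0] at hpre
            have hx' := (singleton_prefix_iff c _).1 hpre
            simp at hx'
            exact hx hx'
          · refine hmin' ((PySem.Chars.find (x :: xs) [c]).toNat - 1) (by omega) ?_
            have hdrop : List.drop (PySem.Chars.find (x :: xs) [c]).toNat (x :: xs)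
                = List.drop ((PySem.Chars.find (x :: xs) [c]).toNat - 1) xs := by
              obtain ⟨k, hkk⟩ := Nat.exists_eq_succ_of_ne_zero (Nat.pos_iff_ne_zero.mp hpos)
              rw [hkk]
              simp
            rw [← hdrop]
            exact hpre
        · exact h
        · exfalso
          refine hmin ((PySem.Chars.find xs [c]).toNat + 1) h ?_
          simpa using hpre'
      omega

-- flag ≠ 0 stops the early return for good
theorem pvALoop_pos (l : List Char) (f : Int) (hf : 0 < f) : pvALoop l f = true := by
  induction l generalizing f with
  | nil => rfl
  | cons x xs ih =>
    simp only [pvALoop]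
    rw [show (x == '(' && f == 0) = false by simp; omega]
    simp only [Bool.false_eq_true, if_false]
    by_cases hc : x = ')'
    · rw [if_pos (by simp [hc])]
      exact ih (f + 1) (by omega)
    · rw [if_neg (by simp [hc])]
      exact ih f hf

theorem pvALoop_eq_find (l : List Char) :
    pvALoop l 0 =
      !(PySem.Chars.find l ['('] != -1 &&
        (PySem.Chars.find l [')'] == -1 || PySem.Chars.find l ['('] < PySem.Chars.find l [')'])) := by
  induction l with
  | nil =>
    have h1 : PySem.Chars.find ([] : List Char) ['('] = -1 :=
      (PySem.Chars.find_eq_neg_one_iff _ _).2 (by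
        intro h; exact absurd ((singleton_infix_iff _ _).1 h) (by simp))
    have h2 : PySem.Chars.find ([] : List Char) [')'] = -1 :=
      (PySem.Chars.find_eq_neg_one_iff _ _).2 (by
        intro h; exact absurd ((singleton_infix_iff _ _).1 h) (by simp))
    simp [pvALoop, h1, h2]
  | cons x xs ih =>
    rw [find_singleton_cons x xs '(', find_singleton_cons x xs ')']
    by_cases hop : x = '('
    · subst hop
      have hL : pvALoop ('(' :: xs) 0 = false := by simp [pvALoop]
      rw [hL, if_pos rfl, if_neg (by decide : ¬ ('(' : Char) = ')')]
      by_cases hfj : PySem.Chars.find xs [')'] = -1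
      · simp [hfj]
      · have h0 : 0 ≤ PySem.Chars.find xs [')'] :=
          (PySem.Chars.find_nonneg_iff _ _).2 ((PySem.Chars.find_ne_neg_one_iff _ _).1 hfj)
        rw [if_neg hfj]
        simp
        omega
    · by_cases hcl : x = ')'
      · subst hcl
        have hL : pvALoop (')' :: xs) 0 = pvALoop xs 1 := by simp [pvALoop]
        rw [hL, pvALoop_pos xs 1 (by omega),
          if_neg (by decide : ¬ (')' : Char) = '('), if_pos rfl]
        by_cases hfi : PySem.Chars.find xs ['('] = -1
        · simp [hfi]
        · have h0 : 0 ≤ PySem.Chars.find xs ['('] :=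
            (PySem.Chars.find_nonneg_iff _ _).2 ((PySem.Chars.find_ne_neg_one_iff _ _).1 hfi)
          rw [if_neg hfi]
          simp
          omega
      · have hL : pvALoop (x :: xs) 0 = pvALoop xs 0 := by
          simp [pvALoop, hop, hcl]
        rw [hL, ih, if_neg hop, if_neg hcl]
        by_cases hfi : PySem.Chars.find xs ['('] = -1 <;>
          by_cases hfj : PySem.Chars.find xs [')'] = -1
        · rw [if_pos hfi, if_pos hfj, hfi, hfj]
        · have hj0 : 0 ≤ PySem.Chars.find xs [')'] :=
            (PySem.Chars.find_nonneg_iff _ _).2 ((PySem.Chars.find_ne_neg_one_iff _ _).1 hfj)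
          rw [if_pos hfi, if_neg hfj, hfi]
          simp
        · have hi0 : 0 ≤ PySem.Chars.find xs ['('] :=
            (PySem.Chars.find_nonneg_iff _ _).2 ((PySem.Chars.find_ne_neg_one_iff _ _).1 hfi)
          rw [if_neg hfi, if_pos hfj, hfj]
          have a1 : (PySem.Chars.find xs ['('] != -1) = true := by simp [hfi]
          have a2 : (PySem.Chars.find xs ['('] + 1 != -1) = true := by simp; omega
          rw [a1, a2]
          simp
        · have hi0 : 0 ≤ PySem.Chars.find xs ['('] :=
            (PySem.Chars.find_nonneg_iff _ _).2 ((PySem.Chars.find_ne_neg_one_iff _ _).1 hfi)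
          have hj0 : 0 ≤ PySem.Chars.find xs [')'] :=
            (PySem.Chars.find_nonneg_iff _ _).2 ((PySem.Chars.find_ne_neg_one_iff _ _).1 hfj)
          rw [if_neg hfi, if_neg hfj]
          have a1 : (PySem.Chars.find xs ['('] != -1) = true := by simp [hfi]
          have a2 : (PySem.Chars.find xs ['('] + 1 != -1) = true := by simp; omega
          have a3 : (PySem.Chars.find xs [')'] == -1) = false := by simp [hfj]
          have a4 : (PySem.Chars.find xs [')'] + 1 == -1) = false := by simp; omega
          have a5 : decide (PySem.Chars.find xs ['('] + 1 < PySem.Chars.find xs [')'] + 1)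
              = decide (PySem.Chars.find xs ['('] < PySem.Chars.find xs [')']) := by simp
          rw [a1, a2, a3, a4, a5]

-- ===== VERDICT (by name: the statement is the Claim_ definition above) =====
theorem check_parentheses_order_spec : Claim_equal_check_parentheses_order := by
  intro s _
  unfold Spec_check_parentheses_order check_parentheses_order check_parentheses_order_alt
  rw [pvALoop_eq_find]
  simp only [PySem.Str.find_eq]
  rfl
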